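-- pv_equiv track=rewrite | github.com/nyayat/Cours-DL-info-jap | L2/[S4] EA2/EA2 TP_TD/EA2 TP5/tp5_ex2_ex3.py | taille_max_cluster
-- ===== SOURCE A (Python) =====
-- def taille_max_cluster(table):
--     cles, h, taille, tmin, tmax, nbCles = table
--     maxi = 0
--     max_tmp = 0
--     for i in range(taille):
--         if cles[i] == None:
--             maxi = max_tmp if max_tmp > maxi else maxi
--             max_tmp = 0
--         else:
--             max_tmp += 1
--     return maxi
-- ===== SOURCE B (Python) =====
-- def taille_max_cluster(table):
--     cles, h, taille, tmin, tmax, nbCles = table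
--     nones = [i for i in range(taille) if cles[i] == None]
--     return max((b - a - 1 for a, b in zip([-1] + nones, nones)), default=0)
-- ===== Notes on version B (the rewrite author's own statement) =====
-- stated objective: alternative
-- what changed: B works in stages instead of A's single running-counter scan: it first materialises the list of None positions, then forms the gap between each consecutive pair of None positions (seeded with -1) via zip, and takes the max of those gaps with default 0.
import Mathlib
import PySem

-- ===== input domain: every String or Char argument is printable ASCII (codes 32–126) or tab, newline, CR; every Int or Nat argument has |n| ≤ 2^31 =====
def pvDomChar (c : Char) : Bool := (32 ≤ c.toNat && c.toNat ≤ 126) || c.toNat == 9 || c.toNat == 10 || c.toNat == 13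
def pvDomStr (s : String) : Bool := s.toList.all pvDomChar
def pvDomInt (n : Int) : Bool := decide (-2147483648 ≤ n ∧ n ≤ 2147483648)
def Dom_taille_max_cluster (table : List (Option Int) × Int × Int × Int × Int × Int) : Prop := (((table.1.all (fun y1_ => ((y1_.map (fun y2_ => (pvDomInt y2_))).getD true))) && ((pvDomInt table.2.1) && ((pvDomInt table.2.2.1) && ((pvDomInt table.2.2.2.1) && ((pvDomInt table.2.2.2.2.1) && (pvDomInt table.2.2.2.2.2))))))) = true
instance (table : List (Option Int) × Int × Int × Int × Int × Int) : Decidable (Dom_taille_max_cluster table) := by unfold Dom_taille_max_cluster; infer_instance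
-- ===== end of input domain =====

-- B replaces A's single running-counter scan by staged passes: collect the None positions,
-- form the gaps between consecutive None positions (seeded with -1), and take their max
-- (alternative decomposition, same cost).

-- ===== PORT A =====
-- literal port of A: fold over range(taille) with state (maxi, max_tmp);
-- cles[i] is PySem.List.pyGet?; out-of-range (excluded by Pre_) defaults to none
def taille_max_cluster (table : List (Option Int) × Int × Int × Int × Int × Int) : Int :=
  match table with
  | (cles, _h, taille, _tmin, _tmax, _nbCles) =>
    ((PySem.List.pyRange 0 taille 1).foldl
      (fun (s : Int × Int) i =>
        if ((PySem.List.pyGet? cles i).getD none).isNone then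
          (if s.2 > s.1 then s.2 else s.1, 0)
        else
          (s.1, s.2 + 1)) (0, 0)).1

-- ===== PORT B =====
-- Python's max(iterable, default=0): first element as accumulator, keep the first maximum
def pymaxD0 : List Int → Int
  | [] => 0
  | g :: gs => gs.foldl (fun m x => if x > m then x else m) g

-- literal port of B: list of None positions, zip it with its (-1)-seeded shift for the gaps, max
def taille_max_cluster_alt (table : List (Option Int) × Int × Int × Int × Int × Int) : Int :=
  match table with
  | (cles, _h, taille, _tmin, _tmax, _nbCles) =>
    let nones := (PySem.List.pyRange 0 taille 1).filter
      (fun i => ((PySem.List.pyGet? cles i).getD none).isNone)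
    pymaxD0 (List.zipWith (fun a b => b - a - 1) ((-1) :: nones) nones)

-- ===== PRECONDITION & SPEC =====
-- A indexes cles[i] for i in range(taille): it raises IndexError iff taille > len(cles)
def Pre_taille_max_cluster (table : List (Option Int) × Int × Int × Int × Int × Int) : Prop :=
  table.2.2.1 ≤ (table.1.length : Int)
instance (table : List (Option Int) × Int × Int × Int × Int × Int) : Decidable (Pre_taille_max_cluster table) := by unfold Pre_taille_max_cluster; infer_instance
def pvWitness_taille_max_cluster : (List (Option Int) × Int × Int × Int × Int × Int) :=
  ([some 1, none, some 2, some 3], 0, 4, 0, 0, 0)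

def Spec_taille_max_cluster (table : List (Option Int) × Int × Int × Int × Int × Int) (out : Int) : Prop := out = taille_max_cluster_alt table
instance (table : List (Option Int) × Int × Int × Int × Int × Int) (out : Int) : Decidable (Spec_taille_max_cluster table out) := by unfold Spec_taille_max_cluster; infer_instance

-- ===== CLAIM (what is proved, stated in full; the proofs are below) =====
def Claim_equal_taille_max_cluster : Prop := ∀ (table : List (Option Int) × Int × Int × Int × Int × Int), Dom_taille_max_cluster table → Pre_taille_max_cluster table → Spec_taille_max_cluster table (taille_max_cluster table)

-- ===== LEMMAS AND PROOFS =====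

-- the gap list of L++[m] extends that of L by the gap from L's last None position to m
theorem pv_zip_concat (f : Int → Int → Int) (a m : Int) (L : List Int) :
    List.zipWith f (a :: (L ++ [m])) (L ++ [m]) =
      List.zipWith f (a :: L) L ++ [f (L.getLastD a) m] := by
  induction L generalizing a with
  | nil => simp
  | cons b bs ih =>
    simp only [List.cons_append, List.zipWith_cons_cons, ih b, List.getLastD_cons]

-- Python's max over a list grown by one element
theorem pymaxD0_concat (x : Int) (l : List Int) (h : l ≠ []) :
    pymaxD0 (l ++ [x]) = if x > pymaxD0 l then x else pymaxD0 l := by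
  cases l with
  | nil => exact absurd rfl h
  | cons b bs => simp [pymaxD0, List.foldl_append]

-- invariant: after processing indices 0..n-1, A's maxi equals the max gap between
-- consecutive None positions so far, and A's max_tmp = n - (last None position) - 1
theorem pv_invariant (g : Int → Bool) (n : Nat) :
    (((List.range n).map (fun (k : Nat) => (k : Int))).foldl (fun (s : Int × Int) i =>
        if g i then (if s.2 > s.1 then s.2 else s.1, 0) else (s.1, s.2 + 1)) (0, 0)).1 =
      pymaxD0 (List.zipWith (fun a b => b - a - 1)
        ((-1) :: (((List.range n).map (fun (k : Nat) => (k : Int))).filter g))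
        (((List.range n).map (fun (k : Nat) => (k : Int))).filter g)) ∧
    (((List.range n).map (fun (k : Nat) => (k : Int))).foldl (fun (s : Int × Int) i =>
        if g i then (if s.2 > s.1 then s.2 else s.1, 0) else (s.1, s.2 + 1)) (0, 0)).2 =
      (n : Int) - (((List.range n).map (fun (k : Nat) => (k : Int))).filter g).getLastD (-1) - 1 := by
  induction n with
  | zero => simp [pymaxD0]
  | succ m ih =>
    obtain ⟨ih1, ih2⟩ := ih
    rw [List.range_succ, List.map_append, List.filter_append, List.foldl_append,
      List.map_cons, List.map_nil]
    by_cases hg : g (m : Int)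
    · rw [List.filter_cons_of_pos hg, List.filter_nil, pv_zip_concat]
      simp only [List.foldl_cons, List.foldl_nil, hg, if_true, ih1, ih2]
      refine ⟨?_, ?_⟩
      · cases hL : ((List.range m).map (fun (k : Nat) => (k : Int))).filter g with
        | nil =>
          have hm : (0:Int) ≤ (m:Int) := Int.natCast_nonneg m
          simp only [List.zipWith_nil_right, List.getLastD_nil, List.nil_append, pymaxD0,
            List.foldl_nil]
          split_ifs <;> omega
        | cons b bs =>
          rw [pymaxD0_concat _ _ (by simp)]
      · rw [List.getLastD_concat]
        push_cast; ring
    · rw [List.filter_cons_of_neg hg, List.filter_nil, List.append_nil]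
      simp only [List.foldl_cons, List.foldl_nil, hg, Bool.false_eq_true, if_false, ih1, ih2]
      exact ⟨trivial, by push_cast; ring⟩

-- ===== VERDICT (by name: the statement is the Claim_ definition above) =====
theorem taille_max_cluster_spec : Claim_equal_taille_max_cluster := by
  intro table _hdom _hpre
  obtain ⟨cles, h, taille, tmin, tmax, nbCles⟩ := table
  show (((PySem.List.pyRange 0 taille 1).foldl
      (fun (s : Int × Int) i =>
        if ((PySem.List.pyGet? cles i).getD none).isNone then
          (if s.2 > s.1 then s.2 else s.1, 0)
        else (s.1, s.2 + 1)) (0, 0)).1) =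
    taille_max_cluster_alt (cles, h, taille, tmin, tmax, nbCles)
  unfold taille_max_cluster_alt
  simp only [PySem.List.pyRange_one, zero_add]
  exact (pv_invariant
    (fun i => ((PySem.List.pyGet? cles i).getD none).isNone) (taille - 0).toNat).1
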